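-- pv_equiv track=rewrite | github.com/jcolinpatrick/kryptos | scripts/transposition/other/e_s_12_reading_orders.py | column_first
-- ===== SOURCE A (Python) =====
-- def column_first(n, width):
--     """Read columns first (top-to-bottom, left-to-right)."""
--     order = []
--     n_rows = (n + width - 1) // width
--     for col in range(width):
--         for row in range(n_rows):
--             pos = row * width + col
--             if pos < n:
--                 order.append(pos)
--     return order
-- ===== SOURCE B (Python) =====
-- def column_first(n, width):
--     """Read columns first (top-to-bottom, left-to-right)."""
--     if width <= 0:
--         return []
--     return sorted(range(n), key=lambda p: (p % width, p // width))
-- ===== Notes on version B (the rewrite author's own statement) =====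
-- stated objective: alternative
-- what changed: Replaces the column-outer/row-inner nested loop with the pos<n padding guard by a single stable sort of range(n) under the key (p % width, p // width); an explicit width <= 0 guard returns [] as A's empty column loop does.
-- crash fix: On width == 0 A raises ZeroDivisionError computing the row count; B returns []. — e.g. on column_first(5, 0): A raises ZeroDivisionError, B returns []
import Mathlib
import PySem

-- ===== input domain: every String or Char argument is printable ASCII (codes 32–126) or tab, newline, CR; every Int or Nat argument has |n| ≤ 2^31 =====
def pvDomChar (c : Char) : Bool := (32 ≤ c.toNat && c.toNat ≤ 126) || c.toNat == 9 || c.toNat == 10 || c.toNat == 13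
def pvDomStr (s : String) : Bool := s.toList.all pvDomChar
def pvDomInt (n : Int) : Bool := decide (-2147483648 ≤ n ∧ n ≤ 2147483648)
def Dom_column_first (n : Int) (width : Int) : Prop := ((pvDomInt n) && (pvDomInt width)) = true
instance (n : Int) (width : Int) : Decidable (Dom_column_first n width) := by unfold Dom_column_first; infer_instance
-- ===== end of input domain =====

-- B replaces A's nested column/row loops with one stable sort of range(n) keyed by (p % width, p // width): an alternative decomposition, not claimed faster.

-- ===== PORT A =====
def column_first (n : Int) (width : Int) : List Int :=
  let n_rows := PySem.Int.floordiv (n + width - 1) width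
  (PySem.List.pyRange 0 width 1).foldl (fun order col =>
    (PySem.List.pyRange 0 n_rows 1).foldl (fun order row =>
      let pos := row * width + col
      if pos < n then order ++ [pos] else order) order) []

-- ===== PORT B =====
def column_first_alt (n : Int) (width : Int) : List Int :=
  if width ≤ 0 then []
  else PySem.List.sorted2 (PySem.List.pyRange 0 n 1)
        (fun p => PySem.Int.mod p width) (fun p => PySem.Int.floordiv p width)

-- ===== PRECONDITION & SPEC =====
-- Pre_ excludes exactly width = 0, where A raises ZeroDivisionError computing the row count.
def Pre_column_first (n : Int) (width : Int) : Prop := width ≠ 0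
instance (n : Int) (width : Int) : Decidable (Pre_column_first n width) := by unfold Pre_column_first; infer_instance
def pvWitness_column_first : Int × Int := (7, 3)
-- On width == 0 A raises ZeroDivisionError computing the row count; B returns [].
def Raises_column_first (n : Int) (width : Int) : Prop := width = 0
instance (n : Int) (width : Int) : Decidable (Raises_column_first n width) := by unfold Raises_column_first; infer_instance
def pvRaiseWitness_column_first : Int × Int := (5, 0)
def pvRaiseWitnessOut_column_first : List Int := []
def Spec_column_first (n : Int) (width : Int) (out : List Int) : Prop := out = column_first_alt n width
instance (n : Int) (width : Int) (out : List Int) : Decidable (Spec_column_first n width out) := by unfold Spec_column_first; infer_instance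

-- ===== CLAIM (what is proved, stated in full; the proofs are below) =====
def Claim_equal_column_first : Prop := ∀ (n : Int) (width : Int), Dom_column_first n width → Pre_column_first n width → Spec_column_first n width (column_first n width)
def Claim_raises_column_first : Prop := (∀ (n : Int) (width : Int), Dom_column_first n width → Raises_column_first n width → ¬ Pre_column_first n width) ∧ (Dom_column_first (pvRaiseWitness_column_first.1) (pvRaiseWitness_column_first.2) ∧ Raises_column_first (pvRaiseWitness_column_first.1) (pvRaiseWitness_column_first.2) ∧ column_first_alt (pvRaiseWitness_column_first.1) (pvRaiseWitness_column_first.2) = pvRaiseWitnessOut_column_first)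

-- ===== LEMMAS AND PROOFS =====

-- B's two-component sort key, as a single lexicographic key.
def pvKey (width : Int) (p : Int) : Int ×ₗ Int :=
  toLex (PySem.Int.mod p width, PySem.Int.floordiv p width)

-- sorted2 with the two Int keys is sorted with the lexicographic pair key.
lemma sorted2_eq_sorted_lex (xs : List Int) (width : Int) :
    PySem.List.sorted2 xs (fun p => PySem.Int.mod p width) (fun p => PySem.Int.floordiv p width)
      = PySem.List.sorted xs (pvKey width) := by
  have hb : (fun (a b : Int) => (decide (PySem.Int.mod a width < PySem.Int.mod b width) ||
        (!decide (PySem.Int.mod b width < PySem.Int.mod a width) &&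
          decide (PySem.Int.floordiv a width < PySem.Int.floordiv b width))))
      = fun a b => decide (pvKey width a < pvKey width b) := by
    funext a b
    rcases lt_trichotomy (PySem.Int.mod a width) (PySem.Int.mod b width) with h | h | h <;>
      simp [pvKey, Prod.Lex.lt_iff, h, not_lt_of_gt]
  simp only [PySem.List.sorted2, PySem.List.sorted, if_neg (by simp : ¬ (false = true))]
  rw [hb]

-- The target list: the grid positions column by column, rows top to bottom.
def pvCols (n width n_rows : Int) : List Int :=
  (PySem.List.pyRange 0 width 1).flatMap (fun col =>
    ((PySem.List.pyRange 0 n_rows 1).filter (fun row => decide (row * width + col < n))).map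
      (fun row => row * width + col))

lemma portA_eq_pvCols (n width : Int) :
    column_first n width = pvCols n width (PySem.Int.floordiv (n + width - 1) width) := by
  unfold column_first pvCols
  have hin : ∀ (acc : List Int) (col : Int),
      (PySem.List.pyRange 0 (PySem.Int.floordiv (n + width - 1) width) 1).foldl
          (fun order row => if row * width + col < n then order ++ [row * width + col] else order) acc
        = acc ++ ((PySem.List.pyRange 0 (PySem.Int.floordiv (n + width - 1) width) 1).filter
            (fun row => decide (row * width + col < n))).map (fun row => row * width + col) := by
    intro acc col
    simpa using PySem.List.foldl_append_if (fun row => decide (row * width + col < n))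
      (fun row => row * width + col) (PySem.List.pyRange 0 (PySem.Int.floordiv (n + width - 1) width) 1) acc
  simp only [hin]
  simpa using PySem.List.foldl_append_eq_flatMap
    (fun col => ((PySem.List.pyRange 0 (PySem.Int.floordiv (n + width - 1) width) 1).filter
        (fun row => decide (row * width + col < n))).map (fun row => row * width + col))
    (PySem.List.pyRange 0 width 1) []

lemma key_eval (width row col : Int) (h0 : 0 ≤ col) (h1 : col < width) :
    pvKey width (row * width + col) = toLex (col, row) := by
  have hw : 0 < width := lt_of_le_of_lt h0 h1
  have hm : PySem.Int.mod (row * width + col) width = col := by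
    rw [PySem.Int.mod_eq_emod_of_pos hw, add_comm, mul_comm, Int.add_mul_emod_self_left,
      Int.emod_eq_of_lt h0 h1]
  have hd : PySem.Int.floordiv (row * width + col) width = row := by
    rw [PySem.Int.floordiv_eq_ediv_of_pos hw, add_comm,
      Int.add_mul_ediv_right _ _ (by omega : width ≠ 0), Int.ediv_eq_zero_of_lt h0 h1, zero_add]
  simp [pvKey, hm, hd]

lemma mem_pvCol {n width n_rows x col : Int}
    (hx : x ∈ ((PySem.List.pyRange 0 n_rows 1).filter (fun row => decide (row * width + col < n))).map
      (fun row => row * width + col)) :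
    ∃ row, 0 ≤ row ∧ row < n_rows ∧ row * width + col < n ∧ x = row * width + col := by
  simp only [List.mem_map, List.mem_filter, PySem.List.mem_pyRange_one, decide_eq_true_eq] at hx
  obtain ⟨row, ⟨⟨h0, h1⟩, h2⟩, h3⟩ := hx
  exact ⟨row, h0, h1, h2, h3.symm⟩

lemma pvCols_pairwise (n width n_rows : Int) :
    (pvCols n width n_rows).Pairwise (fun a b => pvKey width a < pvKey width b) := by
  unfold pvCols
  rw [List.pairwise_flatMap]
  constructor
  · intro col hcol
    rw [PySem.List.mem_pyRange_one] at hcol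
    refine List.Pairwise.map _ ?_ ((PySem.List.pairwise_lt_pyRange_one 0 n_rows).filter _)
    intro a b hab
    rw [key_eval width a col hcol.1 hcol.2, key_eval width b col hcol.1 hcol.2]
    exact Prod.Lex.lt_iff.mpr (Or.inr ⟨rfl, hab⟩)
  · refine (PySem.List.pairwise_lt_pyRange_one 0 width).imp_of_mem ?_
    intro c1 c2 hm1 hm2 hlt x hx y hy
    rw [PySem.List.mem_pyRange_one] at hm1 hm2
    obtain ⟨r1, _, _, _, hx1⟩ := mem_pvCol hx
    obtain ⟨r2, _, _, _, hy1⟩ := mem_pvCol hy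
    rw [hx1, hy1, key_eval width r1 c1 hm1.1 hm1.2, key_eval width r2 c2 hm2.1 hm2.2]
    exact Prod.Lex.lt_iff.mpr (Or.inl hlt)

lemma pvCols_perm (n width : Int) (hw : 0 < width) :
    (pvCols n width (PySem.Int.floordiv (n + width - 1) width)).Perm (PySem.List.pyRange 0 n 1) := by
  set nr := PySem.Int.floordiv (n + width - 1) width with hnr
  have hnodup : (pvCols n width nr).Nodup :=
    (pvCols_pairwise n width nr).imp (fun h => by rintro rfl; exact lt_irrefl _ h)
  rw [List.perm_ext_iff_of_nodup hnodup (PySem.List.nodup_pyRange_one 0 n)]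
  have hmul : n ≤ width * nr := by
    have h1 := Int.mul_ediv_add_emod (n + width - 1) width
    have h2 := Int.emod_nonneg (n + width - 1) (by omega : width ≠ 0)
    have h3 := Int.emod_lt_of_pos (n + width - 1) hw
    rw [hnr, PySem.Int.floordiv_eq_ediv_of_pos hw]
    omega
  intro x
  simp only [pvCols, List.mem_flatMap, PySem.List.mem_pyRange_one]
  constructor
  · rintro ⟨col, hcol, hx⟩
    obtain ⟨row, hr0, hr1, hr2, rfl⟩ := mem_pvCol hx
    have : 0 ≤ row * width := mul_nonneg hr0 (le_of_lt hw)
    exact ⟨by omega, hr2⟩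
  · rintro ⟨hx0, hxn⟩
    refine ⟨x % width, ⟨Int.emod_nonneg x (by omega), Int.emod_lt_of_pos x hw⟩, ?_⟩
    simp only [List.mem_map, List.mem_filter, PySem.List.mem_pyRange_one, decide_eq_true_eq]
    refine ⟨x / width, ⟨⟨Int.ediv_nonneg hx0 (le_of_lt hw), ?_⟩, ?_⟩, ?_⟩
    · rw [hnr, PySem.Int.floordiv_eq_ediv_of_pos hw, Int.ediv_lt_iff_lt_mul hw]
      calc x < n := hxn
        _ ≤ width * ((n + width - 1) / width) := by
            rw [hnr, PySem.Int.floordiv_eq_ediv_of_pos hw] at hmul; exact hmul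
        _ = (n + width - 1) / width * width := mul_comm _ _
    all_goals
      have h1 := Int.mul_ediv_add_emod x width
      have h2 : x / width * width = width * (x / width) := mul_comm _ _
      omega

-- ===== VERDICT (by name: the statement is the Claim_ definition above) =====
theorem column_first_spec : Claim_equal_column_first := by
  intro n width _ hpre
  unfold Spec_column_first column_first_alt
  rcases lt_trichotomy width 0 with hw | hw | hw
  · have h : PySem.List.pyRange 0 width 1 = [] := by
      simp [PySem.List.pyRange_one]
      omega
    rw [if_pos (le_of_lt hw)]
    simp [column_first, h]
  · exact absurd hw hpre
  · rw [if_neg (by omega), sorted2_eq_sorted_lex, portA_eq_pvCols]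
    exact (PySem.List.sorted_eq_of_perm_of_pairwise_lt _ _ _ (pvCols_perm n width hw)
      (pvCols_pairwise n width _)).symm

@[simp] theorem column_first_raises : Claim_raises_column_first := by
  unfold Claim_raises_column_first
  exact ⟨fun n width _ h => by simp [Raises_column_first] at h; simp [Pre_column_first, h], by decide⟩
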